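-- pv_equiv track=rewrite | github.com/clio-vega/proofs | verify_k14.py | hook_length_dim
-- ===== SOURCE A (Python) =====
-- import math
--
-- def hook_length_dim(lam):
--     n = sum(lam)
--     if n == 0:
--         return 1
--     conj = [0] * lam[0]
--     for i, r in enumerate(lam):
--         for j in range(r):
--             conj[j] += 1
--     prod = 1
--     for i in range(len(lam)):
--         for j in range(lam[i]):
--             hook = (lam[i] - j - 1) + (conj[j] - i - 1) + 1
--             prod *= hook
--     return math.factorial(n) // prod
-- ===== SOURCE B (Python) =====
-- import math
--
-- def hook_length_dim(lam):
--     n = sum(lam)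
--     if n == 0:
--         return 1
--     k = len(lam)
--     l = [lam[i] + (k - 1 - i) for i in range(k)]
--     num = math.factorial(n)
--     for i in range(k):
--         x = l[i]
--         for y in l[i + 1:]:
--             num *= x - y
--     den = 1
--     for li in l:
--         den *= math.factorial(li)
--     return num // den
-- ===== Notes on version B (the rewrite author's own statement) =====
-- stated objective: alternative
-- what changed: Replaces the conjugate-partition/hook-length table (O(n) cells, n = sum of parts) by the determinantal formula: beta-numbers l_i = lam_i + k-1-i, then n! * prod_{i<j}(l_i - l_j) // prod_i l_i!, looping only over the O(k^2) index pairs.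
-- outside the precondition, e.g. on hook_length_dim([3, -1]): A returns 0, B raises ValueError; on hook_length_dim([2, 1, 0, 2]): A returns -8, B returns -4
import Mathlib
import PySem

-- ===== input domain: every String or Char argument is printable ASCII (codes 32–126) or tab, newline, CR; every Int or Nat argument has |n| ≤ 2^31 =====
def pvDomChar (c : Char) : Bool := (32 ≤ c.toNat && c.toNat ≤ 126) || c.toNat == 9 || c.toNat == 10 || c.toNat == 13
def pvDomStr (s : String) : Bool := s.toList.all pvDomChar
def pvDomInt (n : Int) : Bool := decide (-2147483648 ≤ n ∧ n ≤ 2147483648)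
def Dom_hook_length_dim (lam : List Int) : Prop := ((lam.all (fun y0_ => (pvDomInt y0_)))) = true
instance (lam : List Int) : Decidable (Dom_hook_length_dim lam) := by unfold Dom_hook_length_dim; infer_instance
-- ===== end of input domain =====

-- B replaces A's conjugate-partition/hook-length table by the beta-number formula
-- n! * prod_{i<j}(l_i - l_j) // prod_i l_i!  with l_i = lam_i + k-1-i: an alternative algorithm
-- looping over the O(k^2) index pairs instead of over the cells of the diagram.

-- ===== PORT A =====
-- math.factorial; exact for the nonnegative arguments it receives inside Pre_ (Python raises on negatives).
def pyFact (n : Int) : Int := (Nat.factorial n.toNat : Int)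

def hook_length_dim (lam : List Int) : Int :=
  let n := lam.sum
  if n = 0 then 1
  else
    -- lam is nonempty here (sum ≠ 0), so lam[0] does not raise; [0]*lam[0] is replicate of toNat
    let lam0 := (PySem.List.pyGet? lam 0).getD 0
    -- for i, r in enumerate(lam): for j in range(r): conj[j] += 1   (i is unused in the body;
    -- range(r) for an int r is List.range r.toNat; conj[j] += 1 raises out of range in Python —
    -- modify is a no-op there, reachable only where Python raises, outside Pre_)
    let conj := lam.foldl
      (fun c r => (List.range r.toNat).foldl (fun c j => c.modify j (· + 1)) c)
      (List.replicate lam0.toNat (0 : Int))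
    let prod := (List.range lam.length).foldl (fun (p : Int) (i : Nat) =>
      (List.range (PySem.List.pyGetD lam (i : Int) 0).toNat).foldl (fun (p : Int) (j : Nat) =>
        p * ((PySem.List.pyGetD lam (i : Int) 0 - (j : Int) - 1)
             + (PySem.List.pyGetD conj (j : Int) 0 - (i : Int) - 1) + 1)) p) 1
    PySem.Int.floordiv (pyFact n) prod

-- ===== PORT B =====
def hook_length_dim_alt (lam : List Int) : Int :=
  let n := lam.sum
  if n = 0 then 1
  else
    let k := lam.length
    let l := (List.range k).map (fun (i : Nat) => PySem.List.pyGetD lam (i : Int) 0 + ((k : Int) - 1 - (i : Int)))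
    let num := (List.range k).foldl (fun (p : Int) (i : Nat) =>
      let x := PySem.List.pyGetD l (i : Int) 0
      (PySem.List.slice l (some ((i : Int) + 1)) none).foldl (fun p y => p * (x - y)) p) (pyFact n)
    let den := l.foldl (fun d li => d * pyFact li) 1
    PySem.Int.floordiv num den

-- ===== PRECONDITION & SPEC =====
-- Pre_ admits every zero-sum list (A's early return) and every weakly-decreasing nonnegative
-- partition — A's intended domain; it excludes the remaining lists, on which A either raises
-- (IndexError/ZeroDivisionError) or returns meaningless values produced by negative hook factors.
def Pre_hook_length_dim (lam : List Int) : Prop :=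
  lam.sum = 0 ∨ (List.Pairwise (· ≥ ·) lam ∧ ∀ x ∈ lam, 0 ≤ x)
instance (lam : List Int) : Decidable (Pre_hook_length_dim lam) := by
  unfold Pre_hook_length_dim; infer_instance

def pvWitness_hook_length_dim : List Int := [3, 2, 2, 1]

def Spec_hook_length_dim (lam : List Int) (out : Int) : Prop := out = hook_length_dim_alt lam
instance (lam : List Int) (out : Int) : Decidable (Spec_hook_length_dim lam out) := by
  unfold Spec_hook_length_dim; infer_instance

-- ===== CLAIM (what is proved, stated in full; the proofs are below) =====
def Claim_equal_hook_length_dim : Prop :=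
  ∀ (lam : List Int), Dom_hook_length_dim lam → Pre_hook_length_dim lam →
    Spec_hook_length_dim lam (hook_length_dim lam)

-- ===== LEMMAS AND PROOFS =====

-- clean characterisations of the two programs' arithmetic
def cntGT (r : List Int) (j : Int) : Int := (r.countP (fun x => decide (j < x)) : Int)

def rowP (a : Int) (r : List Int) : Int :=
  ((List.range a.toNat).map (fun (j : Nat) => a - (j : Int) - 1 + (1 + cntGT r (j : Int)))).prod

def hookP : List Int → Int
  | [] => 1
  | a :: r => rowP a r * hookP r

def betas : List Int → List Int
  | [] => []
  | a :: r => (a + (r.length : Int)) :: betas r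

def vand : List Int → Int
  | [] => 1
  | x :: xs => (xs.map (fun y => x - y)).prod * vand xs

def pfact (L : List Int) : Int := (L.map pyFact).prod

-- fold shapes
theorem mulfold {α : Type} (L : List α) (f : α → Int) :
    ∀ p : Int, L.foldl (fun acc x => acc * f x) p = p * (L.map f).prod := by
  induction L with
  | nil => simp
  | cons a t ih => intro p; simp [ih, mul_assoc]

theorem dblfold {γ δ : Type} (L : List γ) (G : γ → List δ) (F : γ → δ → Int) (p : Int) :
    L.foldl (fun acc i => (G i).foldl (fun acc2 j => acc2 * F i j) acc) p
      = p * (L.map (fun i => ((G i).map (F i)).prod)).prod := by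
  have h : (fun (acc : Int) i => (G i).foldl (fun acc2 j => acc2 * F i j) acc)
      = fun (acc : Int) i => acc * ((G i).map (F i)).prod := by
    funext acc i; exact mulfold (G i) (F i) acc
  rw [h, mulfold L (fun i => ((G i).map (F i)).prod) p]

-- basic facts about cntGT
theorem cntGT_nonneg (r : List Int) (j : Int) : 0 ≤ cntGT r j := Int.natCast_nonneg _

theorem cntGT_cons (a j : Int) (r : List Int) :
    cntGT (a :: r) j = (if j < a then 1 else 0) + cntGT r j := by
  unfold cntGT
  rw [List.countP_cons]
  by_cases h : j < a
  · simp [h]; omega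
  · simp [h]

theorem cntGT_append_singleton (r : List Int) (b j : Int) :
    cntGT (r ++ [b]) j = cntGT r j + (if j < b then 1 else 0) := by
  unfold cntGT
  rw [List.countP_append, List.countP_cons]
  by_cases h : j < b <;> simp [h]

theorem cntGT_eq_length (r : List Int) (b j : Int) (hb : ∀ x ∈ r, b ≤ x) (hj : j < b) :
    cntGT r j = (r.length : Int) := by
  unfold cntGT
  rw [List.countP_eq_length.2]
  intro x hx
  simpa using lt_of_lt_of_le hj (hb x hx)

-- the product over range m of (m - j) is m!
theorem factprod : ∀ m : Nat, ((List.range m).map (fun (j : Nat) => (m : Int) - (j : Int))).prod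
    = (Nat.factorial m : Int) := by
  intro m
  induction m with
  | zero => simp
  | succ m ih =>
    rw [List.range_succ_eq_map, List.map_cons, List.map_map, List.prod_cons]
    rw [List.map_congr_left (g := fun (j : Nat) => (m : Int) - (j : Int))
      (fun j _ => by simp only [Function.comp_apply]; push_cast; ring)]
    rw [ih, Nat.factorial_succ]
    push_cast; ring

-- telescoping identity behind the row lemma
theorem arithprod : ∀ (n : Nat) (c : Int),
    (c + 1 - (n : Int)) * ((List.range n).map (fun (j : Nat) => c - (j : Int) + 1)).prod
      = (c + 1) * ((List.range n).map (fun (j : Nat) => c - (j : Int))).prod := by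
  intro n c
  induction n with
  | zero => simp
  | succ n ih =>
    rw [List.range_succ]
    simp only [List.map_append, List.prod_append, List.map_cons, List.map_nil,
      List.prod_cons, List.prod_nil, mul_one]
    push_cast
    push_cast at ih
    linear_combination (c - (n : Int)) * ih

-- betas
theorem betas_length : ∀ r : List Int, (betas r).length = r.length := by
  intro r; induction r with
  | nil => simp [betas]
  | cons a t ih => simp [betas, ih]

theorem betas_snoc : ∀ (r : List Int) (b : Int),
    betas (r ++ [b]) = (betas r).map (· + 1) ++ [b] := by
  intro r b
  induction r with
  | nil => simp [betas]
  | cons a t ih =>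
    rw [List.cons_append]
    show (a + ((t ++ [b]).length : Int)) :: betas (t ++ [b]) = _
    rw [ih]
    show _ = ((a + (t.length : Int)) + 1) :: ((betas t).map (· + 1) ++ [b])
    congr 1
    simp only [List.length_append, List.length_cons, List.length_nil]
    push_cast; ring

theorem betas_lt_of_le : ∀ (r : List Int) (a : Int), (∀ x ∈ r, x ≤ a) →
    ∀ y ∈ betas r, y < a + (r.length : Int) := by
  intro r
  induction r with
  | nil => intro a _ y hy; simp [betas] at hy
  | cons a' t ih =>
    intro a ha y hy
    rw [betas] at hy
    rcases List.mem_cons.1 hy with h | h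
    · subst h
      have := ha a' (by simp)
      simp only [List.length_cons]
      push_cast; omega
    · have := ih a (fun x hx => ha x (by simp [hx])) y h
      simp only [List.length_cons]
      push_cast at this ⊢; omega

theorem betas_pairwise : ∀ lam : List Int, List.Pairwise (· ≥ ·) lam →
    List.Pairwise (fun x y => y < x) (betas lam) := by
  intro lam
  induction lam with
  | nil => intro _; simp [betas]
  | cons a r ih =>
    intro h
    rw [List.pairwise_cons] at h
    rw [betas, List.pairwise_cons]
    exact ⟨fun y hy => betas_lt_of_le r a h.1 y hy, ih h.2⟩

-- positivity
theorem rowP_pos (a : Int) (r : List Int) : 0 < rowP a r := by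
  apply List.prod_pos
  intro x hx
  rcases List.mem_map.1 hx with ⟨j, hj, rfl⟩
  have hj' : j < a.toNat := List.mem_range.1 hj
  have h1 : (j : Int) < a := by omega
  have := cntGT_nonneg r (j : Int)
  omega

theorem hookP_pos : ∀ lam : List Int, 0 < hookP lam := by
  intro lam
  induction lam with
  | nil => simp [hookP]
  | cons a r ih => exact mul_pos (rowP_pos a r) ih

theorem vand_pos : ∀ L : List Int, List.Pairwise (fun x y => y < x) L → 0 < vand L := by
  intro L
  induction L with
  | nil => intro _; simp [vand]
  | cons x xs ih =>
    intro h
    rw [List.pairwise_cons] at h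
    refine mul_pos (List.prod_pos ?_) (ih h.2)
    intro z hz
    rcases List.mem_map.1 hz with ⟨y, hy, rfl⟩
    have := h.1 y hy
    omega

theorem pyFact_succ (c : Int) (hc : 0 ≤ c) : pyFact (c + 1) = (c + 1) * pyFact c := by
  unfold pyFact
  have h : (c + 1).toNat = c.toNat + 1 := by omega
  rw [h, Nat.factorial_succ]
  have h2 : ((c.toNat : Int)) = c := by omega
  push_cast
  rw [h2]

-- THE ROW LEMMA: the first-row hook product times the Vandermonde factors of the first
-- beta-number equals l_0! .
theorem rowlemma : ∀ (r : List Int) (a : Int), 0 ≤ a → List.Pairwise (· ≥ ·) r →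
    (∀ x ∈ r, 0 ≤ x ∧ x ≤ a) →
    rowP a r * ((betas r).map (fun y => a + (r.length : Int) - y)).prod
      = pyFact (a + (r.length : Int)) := by
  intro r
  induction r using List.reverseRecOn with
  | nil =>
    intro a ha _ _
    have h : ∀ j ∈ List.range a.toNat,
        a - (j : Int) - 1 + (1 + cntGT [] (j : Int)) = (a.toNat : Int) - (j : Int) := by
      intro j _; simp [cntGT]; omega
    simp only [betas, List.map_nil, List.prod_nil, mul_one, List.length_nil, Nat.cast_zero,
      add_zero, rowP]
    rw [List.map_congr_left h, factprod a.toNat]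
    unfold pyFact; rfl
  | append_singleton r' b ih =>
    intro a ha hpw hbd
    have hpw' : List.Pairwise (· ≥ ·) r' := (List.pairwise_append.1 hpw).1
    have hge : ∀ x ∈ r', b ≤ x := by
      intro x hx
      exact (List.pairwise_append.1 hpw).2.2 x hx b (by simp)
    have hb0 : 0 ≤ b := (hbd b (by simp)).1
    have hba : b ≤ a := (hbd b (by simp)).2
    have hbd' : ∀ x ∈ r', 0 ≤ x ∧ x ≤ a := fun x hx => hbd x (by simp [hx])
    have hlen : ((r' ++ [b]).length : Int) = (r'.length : Int) + 1 := by
      rw [List.length_append]; push_cast; simp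
    have hrange : List.range a.toNat
        = List.range b.toNat ++ (List.range (a.toNat - b.toNat)).map (b.toNat + ·) := by
      rw [← List.range_add]; congr 1; omega
    have hsplit : ∀ (s : List Int),
        rowP a s = ((List.range b.toNat).map
            (fun (j : Nat) => a - (j : Int) - 1 + (1 + cntGT s (j : Int)))).prod
          * ((List.range (a.toNat - b.toNat)).map
            (fun (t : Nat) => a - ((b.toNat + t : Nat) : Int) - 1
              + (1 + cntGT s ((b.toNat + t : Nat) : Int)))).prod := by
      intro s
      rw [rowP, hrange, List.map_append, List.prod_append, List.map_map]
      rfl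
    have htail : ∀ t : Nat, cntGT (r' ++ [b]) ((b.toNat + t : Nat) : Int)
        = cntGT r' ((b.toNat + t : Nat) : Int) := by
      intro t
      rw [cntGT_append_singleton, if_neg (by push_cast; omega), add_zero]
    have hhead1 : ∀ j ∈ List.range b.toNat,
        a - (j : Int) - 1 + (1 + cntGT (r' ++ [b]) (j : Int))
          = a + (r'.length : Int) - (j : Int) + 1 := by
      intro j hj
      have hjb : (j : Int) < b := by have := List.mem_range.1 hj; omega
      rw [cntGT_append_singleton, if_pos hjb, cntGT_eq_length r' b _ hge hjb]
      ring
    have hhead0 : ∀ j ∈ List.range b.toNat,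
        a - (j : Int) - 1 + (1 + cntGT r' (j : Int))
          = a + (r'.length : Int) - (j : Int) := by
      intro j hj
      have hjb : (j : Int) < b := by have := List.mem_range.1 hj; omega
      rw [cntGT_eq_length r' b _ hge hjb]
      ring
    set T : Int := ((List.range (a.toNat - b.toNat)).map
        (fun (t : Nat) => a - ((b.toNat + t : Nat) : Int) - 1
          + (1 + cntGT r' ((b.toNat + t : Nat) : Int)))).prod with hT
    have hrow1 : rowP a (r' ++ [b])
        = ((List.range b.toNat).map
            (fun (j : Nat) => a + (r'.length : Int) - (j : Int) + 1)).prod * T := by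
      rw [hsplit (r' ++ [b]), List.map_congr_left hhead1]
      congr 1
      exact congrArg List.prod (List.map_congr_left (fun t _ => by rw [htail t]))
    have hrow0 : rowP a r'
        = ((List.range b.toNat).map
            (fun (j : Nat) => a + (r'.length : Int) - (j : Int))).prod * T := by
      rw [hsplit r', List.map_congr_left hhead0]
    have hH : ((betas (r' ++ [b])).map (fun y => a + ((r' ++ [b]).length : Int) - y)).prod
        = ((betas r').map (fun y => a + (r'.length : Int) - y)).prod
          * (a + (r'.length : Int) + 1 - b) := by
      rw [betas_snoc, List.map_append, List.prod_append, List.map_map]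
      congr 1
      · apply congrArg List.prod
        apply List.map_congr_left
        intro y _
        simp only [Function.comp_apply]
        rw [hlen]; ring
      · simp only [List.map_cons, List.map_nil, List.prod_cons, List.prod_nil, mul_one]
        rw [hlen]; ring
    have hIH := ih a ha hpw' hbd'
    rw [hrow0] at hIH
    have hA := arithprod b.toNat (a + (r'.length : Int))
    have hbcast : ((b.toNat : Nat) : Int) = b := by omega
    rw [hbcast] at hA
    rw [hrow1, hH, hlen, show a + ((r'.length : Int) + 1) = (a + (r'.length : Int)) + 1 from by ring]
    rw [pyFact_succ (a + (r'.length : Int)) (by positivity)]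
    calc ((List.range b.toNat).map
            (fun (j : Nat) => a + (r'.length : Int) - (j : Int) + 1)).prod * T
          * (((betas r').map (fun y => a + (r'.length : Int) - y)).prod
            * (a + (r'.length : Int) + 1 - b))
        = ((a + (r'.length : Int) + 1 - b) * ((List.range b.toNat).map
            (fun (j : Nat) => a + (r'.length : Int) - (j : Int) + 1)).prod)
            * (T * ((betas r').map (fun y => a + (r'.length : Int) - y)).prod) := by ring
      _ = ((a + (r'.length : Int) + 1) * ((List.range b.toNat).map
            (fun (j : Nat) => a + (r'.length : Int) - (j : Int))).prod)
            * (T * ((betas r').map (fun y => a + (r'.length : Int) - y)).prod) := by rw [hA]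
      _ = (a + (r'.length : Int) + 1) * (((List.range b.toNat).map
            (fun (j : Nat) => a + (r'.length : Int) - (j : Int))).prod * T
            * ((betas r').map (fun y => a + (r'.length : Int) - y)).prod) := by ring
      _ = (a + (r'.length : Int) + 1) * pyFact (a + (r'.length : Int)) := by rw [hIH]

-- MAIN IDENTITY: hook product times Vandermonde equals the product of beta factorials.
theorem mainid : ∀ lam : List Int, List.Pairwise (· ≥ ·) lam → (∀ x ∈ lam, 0 ≤ x) →
    hookP lam * vand (betas lam) = pfact (betas lam) := by
  intro lam
  induction lam with
  | nil => intro _ _; simp [hookP, betas, vand, pfact]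
  | cons a r ih =>
    intro h1 h2
    rw [List.pairwise_cons] at h1
    have ha : 0 ≤ a := h2 a (by simp)
    have hbd : ∀ x ∈ r, 0 ≤ x ∧ x ≤ a := fun x hx => ⟨h2 x (by simp [hx]), h1.1 x hx⟩
    have hrow := rowlemma r a ha h1.2 hbd
    have hIH := ih h1.2 (fun x hx => h2 x (by simp [hx]))
    show rowP a r * hookP r * vand ((a + (r.length : Int)) :: betas r)
        = pfact ((a + (r.length : Int)) :: betas r)
    rw [vand]
    rw [show pfact ((a + (r.length : Int)) :: betas r)
        = pyFact (a + (r.length : Int)) * pfact (betas r) from by simp [pfact]]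
    calc rowP a r * hookP r
          * (((betas r).map (fun y => a + (r.length : Int) - y)).prod * vand (betas r))
        = (rowP a r * ((betas r).map (fun y => a + (r.length : Int) - y)).prod)
            * (hookP r * vand (betas r)) := by ring
      _ = pyFact (a + (r.length : Int)) * pfact (betas r) := by rw [hrow, hIH]

-- ===== bridging port A to hookP =====

theorem bump_length : ∀ (t : Nat) (c : List Int),
    ((List.range t).foldl (fun c j => c.modify j (· + 1)) c).length = c.length := by
  intro t
  induction t with
  | zero => intro c; simp
  | succ t ih =>
    intro c
    rw [List.range_succ, List.foldl_append]
    simp [ih]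

theorem getD_modify (l : List Int) (i j : Nat) :
    (l.modify i (· + 1)).getD j 0 = l.getD j 0 + (if i = j ∧ j < l.length then 1 else 0) := by
  by_cases hj : j < l.length
  · have hj' : j < (l.modify i (· + 1)).length := by simpa using hj
    rw [List.getD_eq_getElem _ _ hj', List.getD_eq_getElem _ _ hj]
    rw [List.getElem_modify]
    by_cases hij : i = j
    · simp [hij, hj]
    · simp [hij]
  · rw [List.getD_eq_default _ _ (by simpa using not_lt.1 hj),
      List.getD_eq_default _ _ (not_lt.1 hj)]
    simp [hj]

theorem bump_getD : ∀ (t : Nat) (c : List Int) (j : Nat), j < c.length →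
    ((List.range t).foldl (fun c j => c.modify j (· + 1)) c).getD j 0
      = c.getD j 0 + (if j < t then 1 else 0) := by
  intro t
  induction t with
  | zero => intro c j h; simp
  | succ t ih =>
    intro c j h
    rw [List.range_succ, List.foldl_append]
    simp only [List.foldl_cons, List.foldl_nil]
    rw [getD_modify, ih c j h, bump_length]
    split_ifs <;> omega

theorem conj_getD : ∀ (lam c : List Int) (j : Nat), j < c.length →
    (lam.foldl (fun c r => (List.range r.toNat).foldl (fun c j => c.modify j (· + 1)) c) c).getD j 0
      = c.getD j 0 + cntGT lam (j : Int) := by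
  intro lam
  induction lam with
  | nil => intro c j h; simp [cntGT]
  | cons r t ih =>
    intro c j h
    rw [List.foldl_cons]
    rw [ih _ j (by rw [bump_length]; exact h)]
    rw [bump_getD r.toNat c j h, cntGT_cons]
    have hiff : (if j < r.toNat then (1 : Int) else 0) = (if (j : Int) < r then 1 else 0) := by
      split_ifs <;> omega
    rw [hiff]; ring

-- the absolute (index-based) double product equals the structural hookP
theorem abs_eq_hookP : ∀ lam : List Int, List.Pairwise (· ≥ ·) lam →
    ((List.range lam.length).map (fun (i : Nat) =>
        ((List.range (lam.getD i 0).toNat).map (fun (j : Nat) =>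
          lam.getD i 0 - (j : Int) - 1 + (cntGT lam (j : Int) - (i : Int) - 1 + 1))).prod)).prod
      = hookP lam := by
  intro lam
  induction lam with
  | nil => intro _; simp [hookP]
  | cons a r ih =>
    intro h
    rw [List.pairwise_cons] at h
    rw [List.length_cons, List.range_succ_eq_map, List.map_cons, List.map_map, List.prod_cons]
    show _ = rowP a r * hookP r
    congr 1
    · -- head term = rowP a r
      rw [rowP]
      apply congrArg List.prod
      apply List.map_congr_left
      intro j hj
      have hja : (j : Int) < a := by
        have := List.mem_range.1 hj
        simp only [List.getD_cons_zero] at this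
        omega
      simp only [List.getD_cons_zero]
      rw [cntGT_cons, if_pos hja]
      push_cast; ring
    · -- tail terms
      rw [← ih h.2]
      apply congrArg List.prod
      apply List.map_congr_left
      intro i hi
      have hi' : i < r.length := List.mem_range.1 hi
      simp only [Function.comp_apply, Nat.succ_eq_add_one, List.getD_cons_succ]
      apply congrArg List.prod
      apply List.map_congr_left
      intro j hj
      have hjx : (j : Int) < r.getD i 0 := by
        have := List.mem_range.1 hj; omega
      have hxa : r.getD i 0 ≤ a := by
        rw [List.getD_eq_getElem _ _ hi']
        exact h.1 _ (List.getElem_mem hi')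
      rw [cntGT_cons, if_pos (by omega)]
      push_cast; ring

theorem portA_eq : ∀ lam : List Int, List.Pairwise (· ≥ ·) lam → (∀ x ∈ lam, 0 ≤ x) →
    lam.sum ≠ 0 →
    hook_length_dim lam = PySem.Int.floordiv (pyFact lam.sum) (hookP lam) := by
  intro lam hpw hnn hz
  cases lam with
  | nil => simp at hz
  | cons a r =>
    have hlam0 : (PySem.List.pyGet? (a :: r) 0).getD 0 = a := by
      rw [PySem.List.pyGet?_zero_cons]; rfl
    simp only [hook_length_dim]
    rw [if_neg hz, hlam0]
    congr 1
    set conj := (a :: r).foldl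
        (fun c r => (List.range r.toNat).foldl (fun c j => c.modify j (· + 1)) c)
        (List.replicate a.toNat (0 : Int)) with hconj
    have hcget : ∀ j : Nat, j < a.toNat → conj.getD j 0 = cntGT (a :: r) (j : Int) := by
      intro j hj
      rw [hconj, conj_getD _ _ j (by simpa using hj)]
      rw [List.getD_eq_getElem _ _ (by simpa using hj)]
      simp
    rw [dblfold (List.range (a :: r).length)
      (fun i => List.range (PySem.List.pyGetD (a :: r) (i : Int) 0).toNat)
      (fun i j => (PySem.List.pyGetD (a :: r) (i : Int) 0 - (j : Int) - 1)
        + (PySem.List.pyGetD conj (j : Int) 0 - (i : Int) - 1) + 1) 1]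
    rw [one_mul, ← abs_eq_hookP (a :: r) hpw]
    apply congrArg List.prod
    apply List.map_congr_left
    intro i hi
    have hi' : i < (a :: r).length := List.mem_range.1 hi
    rw [PySem.List.pyGetD_natCast]
    apply congrArg List.prod
    apply List.map_congr_left
    intro j hj
    have hjx : j < ((a :: r).getD i 0).toNat := List.mem_range.1 hj
    have hxa : (a :: r).getD i 0 ≤ a := by
      have hmem : (a :: r).getD i 0 ∈ a :: r := by
        rw [List.getD_eq_getElem _ _ hi']
        exact List.getElem_mem hi'
      rcases List.mem_cons.1 hmem with h | h
      · exact le_of_eq h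
      · exact (List.pairwise_cons.1 hpw).1 _ h
    have hja : j < a.toNat := by omega
    simp only [PySem.List.pyGetD_natCast, hcget j hja]
    ring

-- ===== bridging port B to vand/pfact =====

theorem vandprod : ∀ L : List Int,
    ((List.range L.length).map (fun (i : Nat) =>
        ((L.drop (i + 1)).map (fun y => L.getD i 0 - y)).prod)).prod = vand L := by
  intro L
  induction L with
  | nil => simp [vand]
  | cons x xs ih =>
    rw [List.length_cons, List.range_succ_eq_map, List.map_cons, List.map_map, List.prod_cons]
    rw [vand, ← ih]
    congr 1

theorem lmap : ∀ lam : List Int,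
    (List.range lam.length).map (fun (i : Nat) =>
        lam.getD i 0 + ((lam.length : Int) - 1 - (i : Int)))
      = betas lam := by
  intro lam
  induction lam with
  | nil => simp [betas]
  | cons a r ih =>
    rw [List.length_cons, List.range_succ_eq_map, List.map_cons, List.map_map]
    rw [betas, ← ih]
    congr 1
    · simp only [List.getD_cons_zero, Nat.cast_zero]
      push_cast; ring
    · apply List.map_congr_left
      intro i _
      simp only [Function.comp_apply, Nat.succ_eq_add_one, List.getD_cons_succ]
      push_cast; ring

theorem portB_eq : ∀ lam : List Int, lam.sum ≠ 0 →
    hook_length_dim_alt lam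
      = PySem.Int.floordiv (pyFact lam.sum * vand (betas lam)) (pfact (betas lam)) := by
  intro lam hz
  simp only [hook_length_dim_alt]
  rw [if_neg hz]
  set l := (List.range lam.length).map
      (fun (i : Nat) => PySem.List.pyGetD lam (i : Int) 0 + ((lam.length : Int) - 1 - (i : Int)))
    with hl
  have hlb : l = betas lam := by
    rw [hl, ← lmap lam]
    apply List.map_congr_left
    intro i _
    rw [PySem.List.pyGetD_natCast]
  have hllen : l.length = lam.length := by rw [hlb, betas_length]
  congr 1
  · -- numerator
    have hfun : (fun (p : Int) (i : Nat) =>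
        (PySem.List.slice l (some ((i : Int) + 1)) none).foldl
          (fun p y => p * (PySem.List.pyGetD l (i : Int) 0 - y)) p)
        = fun (p : Int) (i : Nat) =>
          (l.drop (i + 1)).foldl (fun p y => p * (l.getD i 0 - y)) p := by
      funext p i
      have h1 : ((i : Int) + 1) = (((i + 1 : Nat)) : Int) := by push_cast; ring
      rw [h1, PySem.List.slice_from_natCast, PySem.List.pyGetD_natCast]
    rw [hfun, dblfold (List.range lam.length) (fun i => l.drop (i + 1))
      (fun i y => l.getD i 0 - y) (pyFact lam.sum)]
    rw [← hllen, vandprod l, hlb]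
  · -- denominator
    rw [mulfold l pyFact 1, one_mul, hlb]
    rfl

-- ===== VERDICT (by name: the statement is the Claim_ definition above) =====
theorem hook_length_dim_spec : Claim_equal_hook_length_dim := by
  intro lam _ hpre
  unfold Spec_hook_length_dim
  by_cases hz : lam.sum = 0
  · simp only [hook_length_dim, hook_length_dim_alt]
    rw [if_pos hz, if_pos hz]
  · rcases hpre with h | ⟨hpw, hnn⟩
    · exact absurd h hz
    rw [portA_eq lam hpw hnn hz, portB_eq lam hz]
    rw [← mainid lam hpw hnn]
    have hV : 0 < vand (betas lam) := vand_pos _ (betas_pairwise _ hpw)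
    have hP : 0 < hookP lam := hookP_pos lam
    rw [PySem.Int.floordiv_eq_ediv_of_pos hP,
      PySem.Int.floordiv_eq_ediv_of_pos (mul_pos hP hV)]
    rw [mul_comm (pyFact lam.sum) (vand (betas lam)),
      mul_comm (hookP lam) (vand (betas lam))]
    exact (Int.mul_ediv_mul_of_pos _ _ hV).symm
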